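-- pv_equiv track=rewrite | github.com/alekseifeniuk/python-project-lvl2 | gendiff/core.py | generate_diff_dict
-- ===== SOURCE A (Python) =====
-- def generate_diff_dict(data1: dict, data2: dict) -> dict:
--     keys = list(set(data1.keys()) | set(data2.keys()))
--     keys.sort()
--     output_data = dict()
--     for key in keys:
--         if key in data1 and key in data2:
--             if data1[key] == data2[key]:
--                 output_data[f"  {key}"] = data1[key]
--             else:
--                 output_data[f"- {key}"] = data1[key]
--                 output_data[f"+ {key}"] = data2[key]
--         if key not in data2:
--             output_data[f"- {key}"] = data1[key]
--         if key not in data1: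
--             output_data[f"+ {key}"] = data2[key]
--     return output_data
-- ===== SOURCE B (Python) =====
-- def generate_diff_dict(data1: dict, data2: dict) -> dict:
--     # Two-pointer merge of the two sorted key lists; no union set, no membership lookups.
--     ks1 = sorted(data1)
--     ks2 = sorted(data2)
--     out = []
--     i = j = 0
--     while i < len(ks1) or j < len(ks2):
--         if j == len(ks2) or (i < len(ks1) and ks1[i] < ks2[j]):
--             k = ks1[i]
--             out.append((f"- {k}", data1[k]))
--             i += 1
--         elif i == len(ks1) or ks2[j] < ks1[i]:
--             k = ks2[j]
--             out.append((f"+ {k}", data2[k]))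
--             j += 1
--         else:
--             k = ks1[i]
--             if data1[k] == data2[k]:
--                 out.append((f"  {k}", data1[k]))
--             else:
--                 out.append((f"- {k}", data1[k]))
--                 out.append((f"+ {k}", data2[k]))
--             i += 1
--             j += 1
--     return dict(out)
-- ===== Notes on version B (the rewrite author's own statement) =====
-- stated objective: alternative
-- what changed: Replaces A's build-union-set + sort + per-key membership/lookup loop by sorting the two key lists separately and walking them with a two-pointer merge that emits the diff entries directly in sorted order, with no union set and no membership tests.
import Mathlib
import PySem

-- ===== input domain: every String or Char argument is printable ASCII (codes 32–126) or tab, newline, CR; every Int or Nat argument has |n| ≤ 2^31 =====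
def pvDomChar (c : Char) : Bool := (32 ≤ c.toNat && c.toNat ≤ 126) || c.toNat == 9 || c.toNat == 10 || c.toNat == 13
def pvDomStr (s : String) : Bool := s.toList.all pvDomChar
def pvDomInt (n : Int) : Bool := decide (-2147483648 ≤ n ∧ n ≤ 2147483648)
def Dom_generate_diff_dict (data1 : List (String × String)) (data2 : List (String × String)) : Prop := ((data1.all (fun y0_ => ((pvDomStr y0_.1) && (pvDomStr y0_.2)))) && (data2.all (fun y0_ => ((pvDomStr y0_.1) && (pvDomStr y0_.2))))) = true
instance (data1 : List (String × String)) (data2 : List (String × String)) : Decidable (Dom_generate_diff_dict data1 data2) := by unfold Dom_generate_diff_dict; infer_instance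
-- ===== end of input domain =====

-- B replaces A's union-set + sort + per-key membership lookups by a two-pointer merge of the
-- two sorted key lists that emits the diff entries directly in order (objective: alternative).

-- ===== PORT A =====
def generate_diff_dict (data1 : List (String × String)) (data2 : List (String × String)) : List (String × String) :=
  let d1 := PySem.Dict.mk data1
  let d2 := PySem.Dict.mk data2
  -- data1.keys() of the Python dict = first occurrences of the keys, in insertion order
  let keys := PySem.List.sorted
      (PySem.Set.union (PySem.Set.ofList (PySem.List.dedup (data1.map Prod.fst)))
        (PySem.List.dedup (data2.map Prod.fst))) (fun x => x) false
  (keys.foldl (fun out key =>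
      let out := if d1.contains key && d2.contains key then
          (if d1.getD key "" = d2.getD key "" then
            out.insert ("  " ++ key) (d1.getD key "")
          else
            (out.insert ("- " ++ key) (d1.getD key "")).insert ("+ " ++ key) (d2.getD key ""))
        else out
      let out := if !(d2.contains key) then out.insert ("- " ++ key) (d1.getD key "") else out
      let out := if !(d1.contains key) then out.insert ("+ " ++ key) (d2.getD key "") else out
      out) PySem.Dict.empty).items

-- ===== PORT B =====
-- the while loop of Source B: two pointers over the two sorted key lists
def mergeDiffAux (d1 d2 : PySem.Dict String String) : List String → List String → List (String × String)
  | [], [] => []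
  | k :: t1, [] => ("- " ++ k, d1.getD k "") :: mergeDiffAux d1 d2 t1 []
  | [], k :: t2 => ("+ " ++ k, d2.getD k "") :: mergeDiffAux d1 d2 [] t2
  | k1 :: t1, k2 :: t2 =>
    if k1 < k2 then ("- " ++ k1, d1.getD k1 "") :: mergeDiffAux d1 d2 t1 (k2 :: t2)
    else if k2 < k1 then ("+ " ++ k2, d2.getD k2 "") :: mergeDiffAux d1 d2 (k1 :: t1) t2
    else
      (if d1.getD k1 "" = d2.getD k1 "" then [("  " ++ k1, d1.getD k1 "")]
       else [("- " ++ k1, d1.getD k1 ""), ("+ " ++ k1, d2.getD k1 "")]) ++ mergeDiffAux d1 d2 t1 t2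
  termination_by l1 l2 => l1.length + l2.length
  decreasing_by all_goals (simp only [List.length_cons]; omega)

def generate_diff_dict_alt (data1 : List (String × String)) (data2 : List (String × String)) : List (String × String) :=
  let d1 := PySem.Dict.mk data1
  let d2 := PySem.Dict.mk data2
  let ks1 := PySem.List.sorted (PySem.List.dedup (data1.map Prod.fst)) (fun x => x) false
  let ks2 := PySem.List.sorted (PySem.List.dedup (data2.map Prod.fst)) (fun x => x) false
  mergeDiffAux d1 d2 ks1 ks2

-- ===== PRECONDITION & SPEC =====
def Spec_generate_diff_dict (data1 : List (String × String)) (data2 : List (String × String)) (out : List (String × String)) : Prop := out = generate_diff_dict_alt data1 data2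
instance (data1 : List (String × String)) (data2 : List (String × String)) (out : List (String × String)) : Decidable (Spec_generate_diff_dict data1 data2 out) := by unfold Spec_generate_diff_dict; infer_instance

-- ===== CLAIM (what is proved, stated in full; the proofs are below) =====
def Claim_equal_generate_diff_dict : Prop := ∀ (data1 : List (String × String)) (data2 : List (String × String)), Dom_generate_diff_dict data1 data2 → Spec_generate_diff_dict data1 data2 (generate_diff_dict data1 data2)

-- ===== LEMMAS AND PROOFS =====

-- the merged (strictly sorted) key sequence the two-pointer walk traverses
def pvUnion : List String → List String → List String
  | [], [] => []
  | k :: t1, [] => k :: pvUnion t1 []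
  | [], k :: t2 => k :: pvUnion [] t2
  | k1 :: t1, k2 :: t2 =>
    if k1 < k2 then k1 :: pvUnion t1 (k2 :: t2)
    else if k2 < k1 then k2 :: pvUnion (k1 :: t1) t2
    else k1 :: pvUnion t1 t2
  termination_by l1 l2 => l1.length + l2.length
  decreasing_by all_goals (simp only [List.length_cons]; omega)

-- entries one key contributes, decided by membership in the two key lists
def pvEmit (d1 d2 : PySem.Dict String String) (l1 l2 : List String) (k : String) : List (String × String) :=
  if k ∈ l1 then
    if k ∈ l2 then
      (if d1.getD k "" = d2.getD k "" then [("  " ++ k, d1.getD k "")]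
       else [("- " ++ k, d1.getD k ""), ("+ " ++ k, d2.getD k "")])
    else [("- " ++ k, d1.getD k "")]
  else [("+ " ++ k, d2.getD k "")]

-- entries one key contributes in A's loop body, decided by dict membership
def pvEmitC (d1 d2 : PySem.Dict String String) (k : String) : List (String × String) :=
  (if d1.contains k && d2.contains k then
    (if d1.getD k "" = d2.getD k "" then [("  " ++ k, d1.getD k "")]
     else [("- " ++ k, d1.getD k ""), ("+ " ++ k, d2.getD k "")])
   else []) ++
  (if !(d2.contains k) then [("- " ++ k, d1.getD k "")] else []) ++
  (if !(d1.contains k) then [("+ " ++ k, d2.getD k "")] else [])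

theorem mem_pvUnion (l1 l2 : List String) (k : String) :
    k ∈ pvUnion l1 l2 ↔ k ∈ l1 ∨ k ∈ l2 := by
  induction l1, l2 using pvUnion.induct with
  | case1 => simp [pvUnion]
  | case2 k' t1 ih => rw [pvUnion]; simp [ih]
  | case3 k' t2 ih => rw [pvUnion]; simp [ih]
  | case4 k1 t1 k2 t2 h ih =>
      rw [pvUnion, if_pos h]; simp [ih]; tauto
  | case5 k1 t1 k2 t2 h h2 ih =>
      rw [pvUnion, if_neg h, if_pos h2]; simp [ih]; tauto
  | case6 k1 t1 k2 t2 h h2 ih =>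
      have : k1 = k2 := le_antisymm (not_lt.mp h2) (not_lt.mp h)
      subst this
      rw [pvUnion, if_neg h, if_neg h2]; simp [ih]; tauto

theorem pairwise_pvUnion (l1 l2 : List String)
    (h1 : l1.Pairwise (· < ·)) (h2 : l2.Pairwise (· < ·)) :
    (pvUnion l1 l2).Pairwise (· < ·) := by
  induction l1, l2 using pvUnion.induct with
  | case1 => simp [pvUnion]
  | case2 k t1 ih =>
      rw [pvUnion, List.pairwise_cons]
      refine ⟨?_, ih (List.pairwise_cons.mp h1).2 h2⟩
      intro a ha
      rcases (mem_pvUnion _ _ _).mp ha with h | h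
      · exact (List.pairwise_cons.mp h1).1 a h
      · simp at h
  | case3 k t2 ih =>
      rw [pvUnion, List.pairwise_cons]
      refine ⟨?_, ih h1 (List.pairwise_cons.mp h2).2⟩
      intro a ha
      rcases (mem_pvUnion _ _ _).mp ha with h | h
      · simp at h
      · exact (List.pairwise_cons.mp h2).1 a h
  | case4 k1 t1 k2 t2 h ih =>
      rw [pvUnion, if_pos h, List.pairwise_cons]
      refine ⟨?_, ih (List.pairwise_cons.mp h1).2 h2⟩
      intro a ha
      rcases (mem_pvUnion _ _ _).mp ha with hm | hm
      · exact (List.pairwise_cons.mp h1).1 a hm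
      · rcases List.mem_cons.mp hm with rfl | hm
        · exact h
        · exact h.trans ((List.pairwise_cons.mp h2).1 a hm)
  | case5 k1 t1 k2 t2 h h2' ih =>
      rw [pvUnion, if_neg h, if_pos h2', List.pairwise_cons]
      refine ⟨?_, ih h1 (List.pairwise_cons.mp h2).2⟩
      intro a ha
      rcases (mem_pvUnion _ _ _).mp ha with hm | hm
      · rcases List.mem_cons.mp hm with rfl | hm
        · exact h2'
        · exact h2'.trans ((List.pairwise_cons.mp h1).1 a hm)
      · exact (List.pairwise_cons.mp h2).1 a hm
  | case6 k1 t1 k2 t2 h h2' ih =>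
      have hk : k1 = k2 := le_antisymm (not_lt.mp h2') (not_lt.mp h)
      subst hk
      rw [pvUnion, if_neg h, if_neg h2', List.pairwise_cons]
      refine ⟨?_, ih (List.pairwise_cons.mp h1).2 (List.pairwise_cons.mp h2).2⟩
      intro a ha
      rcases (mem_pvUnion _ _ _).mp ha with hm | hm
      · exact (List.pairwise_cons.mp h1).1 a hm
      · exact (List.pairwise_cons.mp h2).1 a hm

theorem pvEmit_congr (d1 d2 : PySem.Dict String String) (l1 l1' l2 l2' : List String) (k : String)
    (h1 : k ∈ l1 ↔ k ∈ l1') (h2 : k ∈ l2 ↔ k ∈ l2') :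
    pvEmit d1 d2 l1 l2 k = pvEmit d1 d2 l1' l2' k := by
  unfold pvEmit
  by_cases m1 : k ∈ l1 <;> by_cases m2 : k ∈ l2
  · simp [m1, m2, h1.mp m1, h2.mp m2]
  · have m2' : k ∉ l2' := fun hx => m2 (h2.mpr hx)
    simp [m1, m2, h1.mp m1, m2']
  · have m1' : k ∉ l1' := fun hx => m1 (h1.mpr hx)
    simp [m1, m2, m1', h2.mp m2]
  · have m1' : k ∉ l1' := fun hx => m1 (h1.mpr hx)
    simp [m1, m2, m1']

-- B's merge is the pvEmit-expansion of the merged key sequence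
theorem mergeDiffAux_eq (d1 d2 : PySem.Dict String String) (l1 l2 : List String)
    (h1 : l1.Pairwise (· < ·)) (h2 : l2.Pairwise (· < ·)) :
    mergeDiffAux d1 d2 l1 l2 = (pvUnion l1 l2).flatMap (pvEmit d1 d2 l1 l2) := by
  induction l1, l2 using pvUnion.induct with
  | case1 => simp [mergeDiffAux, pvUnion]
  | case2 k t1 ih =>
      obtain ⟨hhd, htl⟩ := List.pairwise_cons.mp h1
      have hk1 : k ∉ t1 := fun hm => lt_irrefl k (hhd k hm)
      have htail : (pvUnion t1 []).flatMap (pvEmit d1 d2 (k :: t1) []) =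
          (pvUnion t1 []).flatMap (pvEmit d1 d2 t1 []) := by
        apply List.flatMap_congr
        intro x hx
        rcases (mem_pvUnion _ _ _).mp hx with hm | hm
        · exact pvEmit_congr _ _ _ _ _ _ _ (by simp; intro h; exact absurd (h ▸ hm) hk1) Iff.rfl
        · simp at hm
      rw [mergeDiffAux, pvUnion, List.flatMap_cons, htail, ih htl h2]
      simp [pvEmit]
  | case3 k t2 ih =>
      obtain ⟨hhd, htl⟩ := List.pairwise_cons.mp h2
      have hk2 : k ∉ t2 := fun hm => lt_irrefl k (hhd k hm)
      have htail : (pvUnion [] t2).flatMap (pvEmit d1 d2 [] (k :: t2)) =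
          (pvUnion [] t2).flatMap (pvEmit d1 d2 [] t2) := by
        apply List.flatMap_congr
        intro x hx
        rcases (mem_pvUnion _ _ _).mp hx with hm | hm
        · simp at hm
        · exact pvEmit_congr _ _ _ _ _ _ _ Iff.rfl (by simp; intro h; exact absurd (h ▸ hm) hk2)
      rw [mergeDiffAux, pvUnion, List.flatMap_cons, htail, ih h1 htl]
      simp [pvEmit]
  | case4 k1 t1 k2 t2 h ih =>
      obtain ⟨hhd1, htl1⟩ := List.pairwise_cons.mp h1
      obtain ⟨hhd2, htl2⟩ := List.pairwise_cons.mp h2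
      have hgt : ∀ a, a ∈ t1 ∨ a ∈ k2 :: t2 → k1 < a := by
        intro a ha
        rcases ha with hm | hm
        · exact hhd1 a hm
        · rcases List.mem_cons.mp hm with rfl | hm
          · exact h
          · exact h.trans (hhd2 a hm)
      have hk2 : k1 ∉ k2 :: t2 := fun hm => lt_irrefl k1 (hgt k1 (Or.inr hm))
      have htail : (pvUnion t1 (k2 :: t2)).flatMap (pvEmit d1 d2 (k1 :: t1) (k2 :: t2)) =
          (pvUnion t1 (k2 :: t2)).flatMap (pvEmit d1 d2 t1 (k2 :: t2)) := by
        apply List.flatMap_congr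
        intro x hx
        have hne : x ≠ k1 := fun he => lt_irrefl k1 (he ▸ hgt x ((mem_pvUnion _ _ _).mp hx))
        exact pvEmit_congr _ _ _ _ _ _ _ (by simp [hne]) Iff.rfl
      rw [mergeDiffAux, pvUnion, if_pos h, if_pos h, List.flatMap_cons, htail, ih htl1 h2]
      simp [pvEmit, hk2]
  | case5 k1 t1 k2 t2 h h2' ih =>
      obtain ⟨hhd1, htl1⟩ := List.pairwise_cons.mp h1
      obtain ⟨hhd2, htl2⟩ := List.pairwise_cons.mp h2
      have hgt : ∀ a, a ∈ k1 :: t1 ∨ a ∈ t2 → k2 < a := by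
        intro a ha
        rcases ha with hm | hm
        · rcases List.mem_cons.mp hm with rfl | hm
          · exact h2'
          · exact h2'.trans (hhd1 a hm)
        · exact hhd2 a hm
      have hk1 : k2 ∉ k1 :: t1 := fun hm => lt_irrefl k2 (hgt k2 (Or.inl hm))
      have htail : (pvUnion (k1 :: t1) t2).flatMap (pvEmit d1 d2 (k1 :: t1) (k2 :: t2)) =
          (pvUnion (k1 :: t1) t2).flatMap (pvEmit d1 d2 (k1 :: t1) t2) := by
        apply List.flatMap_congr
        intro x hx
        have hne : x ≠ k2 := fun he => lt_irrefl k2 (he ▸ hgt x ((mem_pvUnion _ _ _).mp hx))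
        exact pvEmit_congr _ _ _ _ _ _ _ Iff.rfl (by simp [hne])
      rw [mergeDiffAux, pvUnion, if_neg h, if_neg h, if_pos h2', if_pos h2', List.flatMap_cons,
        htail, ih h1 htl2]
      simp [pvEmit, hk1]
  | case6 k1 t1 k2 t2 h h2' ih =>
      have hk : k1 = k2 := le_antisymm (not_lt.mp h2') (not_lt.mp h)
      subst hk
      obtain ⟨hhd1, htl1⟩ := List.pairwise_cons.mp h1
      obtain ⟨hhd2, htl2⟩ := List.pairwise_cons.mp h2
      have htail : (pvUnion t1 t2).flatMap (pvEmit d1 d2 (k1 :: t1) (k1 :: t2)) =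
          (pvUnion t1 t2).flatMap (pvEmit d1 d2 t1 t2) := by
        apply List.flatMap_congr
        intro x hx
        have hne : x ≠ k1 := by
          rcases (mem_pvUnion _ _ _).mp hx with hm | hm
          · exact fun he => lt_irrefl k1 (he ▸ hhd1 x hm)
          · exact fun he => lt_irrefl k1 (he ▸ hhd2 x hm)
        exact pvEmit_congr _ _ _ _ _ _ _ (by simp [hne]) (by simp [hne])
      rw [mergeDiffAux, pvUnion, if_neg h, if_neg h, if_neg h2', if_neg h2', List.flatMap_cons,
        htail, ih htl1 htl2]
      simp [pvEmit]

-- "<tag> ++ k" strings collide only when both the tag and the key agree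
theorem pvTagKey_ne (t t' k k' : String) (hlen : t.toList.length = t'.toList.length)
    (h : t ≠ t' ∨ k ≠ k') : t ++ k ≠ t' ++ k' := by
  intro he
  have hl := congrArg String.toList he
  simp only [String.toList_append] at hl
  obtain ⟨e1, e2⟩ := List.append_inj hl hlen
  rcases h with h | h
  · exact h (String.toList_inj.mp e1)
  · exact h (String.toList_inj.mp e2)

-- A's output-dict keys never collide: fresh inserts append
theorem not_contains_of_fresh (d : PySem.Dict String String) (k : String)
    (h : ∀ p ∈ d.items, p.1 ≠ k) : d.contains k = false := by
  rw [← Bool.not_eq_true, PySem.Dict.contains_iff_mem_keys]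
  simp only [PySem.Dict.keys, List.mem_map]
  rintro ⟨p, hp, rfl⟩; exact h p hp rfl

-- one iteration of A's loop appends exactly pvEmitC key
theorem stepA_items (d1 d2 : PySem.Dict String String) (out : PySem.Dict String String) (key : String)
    (hf : ∀ p ∈ out.items, p.1 ≠ "  " ++ key ∧ p.1 ≠ "- " ++ key ∧ p.1 ≠ "+ " ++ key) :
    (let o := if d1.contains key && d2.contains key then
        (if d1.getD key "" = d2.getD key "" then
          out.insert ("  " ++ key) (d1.getD key "")
        else
          (out.insert ("- " ++ key) (d1.getD key "")).insert ("+ " ++ key) (d2.getD key ""))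
      else out
     let o := if !(d2.contains key) then o.insert ("- " ++ key) (d1.getD key "") else o
     let o := if !(d1.contains key) then o.insert ("+ " ++ key) (d2.getD key "") else o
     o).items = out.items ++ pvEmitC d1 d2 key := by
  have hA : out.contains ("  " ++ key) = false := not_contains_of_fresh _ _ (fun p hp => (hf p hp).1)
  have hB : out.contains ("- " ++ key) = false := not_contains_of_fresh _ _ (fun p hp => (hf p hp).2.1)
  have hC : out.contains ("+ " ++ key) = false := not_contains_of_fresh _ _ (fun p hp => (hf p hp).2.2)
  unfold pvEmitC
  by_cases c1 : d1.contains key = true <;> by_cases c2 : d2.contains key = true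
  · by_cases cv : d1.getD key "" = d2.getD key ""
    · simp [c1, c2, cv, PySem.Dict.items_insert_of_not_contains _ _ hA]
    · have hB' : (out.insert ("- " ++ key) (d1.getD key "")).contains ("+ " ++ key) = false := by
        apply not_contains_of_fresh
        rw [PySem.Dict.items_insert_of_not_contains _ _ hB]
        intro p hp
        rcases List.mem_append.mp hp with hp | hp
        · exact (hf p hp).2.2
        · rcases List.mem_singleton.mp hp with rfl
          exact pvTagKey_ne "- " "+ " key key (by decide) (Or.inl (by decide))
      simp [c1, c2, cv, PySem.Dict.items_insert_of_not_contains _ _ hB,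
        PySem.Dict.items_insert_of_not_contains _ _ hB']
  · simp [c1, c2, PySem.Dict.items_insert_of_not_contains _ _ hB]
  · simp [c1, c2, PySem.Dict.items_insert_of_not_contains _ _ hC]
  · have hB' : (out.insert ("- " ++ key) (d1.getD key "")).contains ("+ " ++ key) = false := by
      apply not_contains_of_fresh
      rw [PySem.Dict.items_insert_of_not_contains _ _ hB]
      intro p hp
      rcases List.mem_append.mp hp with hp | hp
      · exact (hf p hp).2.2
      · rcases List.mem_singleton.mp hp with rfl
        exact pvTagKey_ne "- " "+ " key key (by decide) (Or.inl (by decide))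
    simp [c1, c2, PySem.Dict.items_insert_of_not_contains _ _ hB,
      PySem.Dict.items_insert_of_not_contains _ _ hB']

-- A's whole loop is the pvEmitC-expansion of its key list
set_option maxHeartbeats 1000000 in
theorem foldA_items (d1 d2 : PySem.Dict String String) (ks : List String) (acc : PySem.Dict String String)
    (hnd : ks.Nodup)
    (hf : ∀ k ∈ ks, ∀ p ∈ acc.items, p.1 ≠ "  " ++ k ∧ p.1 ≠ "- " ++ k ∧ p.1 ≠ "+ " ++ k) :
    (ks.foldl (fun out key =>
      let out := if d1.contains key && d2.contains key then
          (if d1.getD key "" = d2.getD key "" then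
            out.insert ("  " ++ key) (d1.getD key "")
          else
            (out.insert ("- " ++ key) (d1.getD key "")).insert ("+ " ++ key) (d2.getD key ""))
        else out
      let out := if !(d2.contains key) then out.insert ("- " ++ key) (d1.getD key "") else out
      let out := if !(d1.contains key) then out.insert ("+ " ++ key) (d2.getD key "") else out
      out) acc).items = acc.items ++ ks.flatMap (pvEmitC d1 d2) := by
  induction ks generalizing acc with
  | nil => simp
  | cons k t ih =>
      obtain ⟨hk, hndt⟩ := List.nodup_cons.mp hnd
      rw [List.foldl_cons, List.flatMap_cons]
      have hstep := stepA_items d1 d2 acc k (hf k (List.mem_cons_self))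
      simp only at hstep
      rw [ih _ hndt, hstep, List.append_assoc]
      intro k' hk' p hp
      rw [hstep] at hp
      rcases List.mem_append.mp hp with hp | hp
      · exact hf k' (List.mem_cons_of_mem _ hk') p hp
      · have hne : k' ≠ k := fun he => hk (he ▸ hk')
        have hkey : p.1 = "  " ++ k ∨ p.1 = "- " ++ k ∨ p.1 = "+ " ++ k := by
          unfold pvEmitC at hp
          split_ifs at hp <;> simp at hp <;>
            (first
              | (rcases hp with (rfl | rfl | rfl | rfl))
              | (rcases hp with (rfl | rfl | rfl))
              | (rcases hp with (rfl | rfl))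
              | (rcases hp with rfl)) <;> simp
        refine ⟨?_, ?_, ?_⟩ <;>
          rcases hkey with hkey | hkey | hkey <;>
          rw [hkey] <;>
          exact pvTagKey_ne _ _ _ _ (by decide)
            (by first | exact Or.inl (by decide) | exact Or.inr (Ne.symm hne))

-- pvEmitC agrees with pvEmit when contains mirrors list membership
theorem pvEmitC_eq_pvEmit (d1 d2 : PySem.Dict String String) (l1 l2 : List String) (k : String)
    (h1 : d1.contains k = true ↔ k ∈ l1) (h2 : d2.contains k = true ↔ k ∈ l2)
    (hk : k ∈ l1 ∨ k ∈ l2) :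
    pvEmitC d1 d2 k = pvEmit d1 d2 l1 l2 k := by
  unfold pvEmitC pvEmit
  by_cases m1 : k ∈ l1 <;> by_cases m2 : k ∈ l2
  · simp [h1.mpr m1, h2.mpr m2, m1, m2]
  · have c2 : d2.contains k = false := Bool.eq_false_iff.mpr (fun hx => m2 (h2.mp hx))
    simp [h1.mpr m1, c2, m1, m2]
  · have c1 : d1.contains k = false := Bool.eq_false_iff.mpr (fun hx => m1 (h1.mp hx))
    simp [c1, h2.mpr m2, m1, m2]
  · tauto

-- a strictly sorted list with the union's members IS A's sorted union-set key list
theorem sortedUnion_eq_pvUnion (xs ys : List String) :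
    PySem.List.sorted
      (PySem.Set.union (PySem.Set.ofList (PySem.List.dedup xs)) (PySem.List.dedup ys))
      (fun x => x) false
    = pvUnion (PySem.List.sorted (PySem.List.dedup xs) (fun x => x) false)
              (PySem.List.sorted (PySem.List.dedup ys) (fun x => x) false) := by
  have hU : PySem.Set.union (PySem.Set.ofList (PySem.List.dedup xs)) (PySem.List.dedup ys)
      = PySem.Set.ofList (PySem.List.dedup xs ++ PySem.List.dedup ys) := by
    simp [PySem.Set.union, PySem.Set.update, PySem.Set.ofList, List.foldl_append]
  have hp1 : (PySem.List.sorted (PySem.List.dedup xs) (fun x => x) false).Pairwise (· < ·) := by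
    have hle := PySem.List.sorted_pairwise (xs := PySem.List.dedup xs) (key := fun x : String => x)
    have hnd : (PySem.List.sorted (PySem.List.dedup xs) (fun x => x) false).Nodup :=
      (PySem.List.sorted_perm (PySem.List.dedup xs) _ false).symm.nodup (PySem.List.nodup_dedup xs)
    exact (hle.and hnd).imp (fun h => lt_of_le_of_ne h.1 h.2)
  have hp2 : (PySem.List.sorted (PySem.List.dedup ys) (fun x => x) false).Pairwise (· < ·) := by
    have hle := PySem.List.sorted_pairwise (xs := PySem.List.dedup ys) (key := fun x : String => x)
    have hnd : (PySem.List.sorted (PySem.List.dedup ys) (fun x => x) false).Nodup :=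
      (PySem.List.sorted_perm (PySem.List.dedup ys) _ false).symm.nodup (PySem.List.nodup_dedup ys)
    exact (hle.and hnd).imp (fun h => lt_of_le_of_ne h.1 h.2)
  have hpU := pairwise_pvUnion _ _ hp1 hp2
  rw [hU]
  apply PySem.List.sorted_eq_of_perm_of_pairwise_lt
  · apply (List.perm_ext_iff_of_nodup (hpU.imp ne_of_lt)
      (PySem.Set.nodup_ofList _)).mpr
    intro a
    rw [mem_pvUnion, PySem.Set.mem_ofList, List.mem_append,
      PySem.List.mem_sorted, PySem.List.mem_sorted]
  · exact hpU

-- ===== VERDICT (by name: the statement is the Claim_ definition above) =====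
set_option maxHeartbeats 1000000 in
theorem generate_diff_dict_spec : Claim_equal_generate_diff_dict := by
  intro data1 data2 _
  unfold Spec_generate_diff_dict generate_diff_dict generate_diff_dict_alt
  simp only []
  set d1 := PySem.Dict.mk data1 with hd1
  set d2 := PySem.Dict.mk data2 with hd2
  set ks1 := PySem.List.sorted (PySem.List.dedup (data1.map Prod.fst)) (fun x => x) false with hks1
  set ks2 := PySem.List.sorted (PySem.List.dedup (data2.map Prod.fst)) (fun x => x) false with hks2
  have hp1 : ks1.Pairwise (· < ·) := by
    have hle := PySem.List.sorted_pairwise (xs := PySem.List.dedup (data1.map Prod.fst)) (key := fun x : String => x)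
    have hnd : ks1.Nodup :=
      (PySem.List.sorted_perm _ _ false).symm.nodup (PySem.List.nodup_dedup _)
    exact (hle.and hnd).imp (fun h => lt_of_le_of_ne h.1 h.2)
  have hp2 : ks2.Pairwise (· < ·) := by
    have hle := PySem.List.sorted_pairwise (xs := PySem.List.dedup (data2.map Prod.fst)) (key := fun x : String => x)
    have hnd : ks2.Nodup :=
      (PySem.List.sorted_perm _ _ false).symm.nodup (PySem.List.nodup_dedup _)
    exact (hle.and hnd).imp (fun h => lt_of_le_of_ne h.1 h.2)
  have hpU := pairwise_pvUnion _ _ hp1 hp2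
  rw [sortedUnion_eq_pvUnion, mergeDiffAux_eq d1 d2 _ _ hp1 hp2,
    foldA_items d1 d2 _ _ (hpU.imp ne_of_lt)
      (by intro k _ p hp; simp [PySem.Dict.empty] at hp)]
  simp only [PySem.Dict.empty, List.nil_append]
  apply List.flatMap_congr
  intro k hk
  have hm := (mem_pvUnion _ _ _).mp hk
  apply pvEmitC_eq_pvEmit
  · rw [PySem.Dict.contains_iff_mem_keys, hks1, PySem.List.mem_sorted, PySem.List.mem_dedup, hd1]
    rfl
  · rw [PySem.Dict.contains_iff_mem_keys, hks2, PySem.List.mem_sorted, PySem.List.mem_dedup, hd2]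
    rfl
  · exact hm
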